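-- pv_equiv track=rewrite | github.com/cinnamonpie007/python | hw_6/lesson_2.py | double
-- ===== SOURCE A (Python) =====
-- def double(word):
--     result = ''
--     if len(word) > 1:
--         last_simb = ''
--         for i in word:
--             if last_simb == i:
--                 result += i
--                 last_simb = i
--             else:
--                 last_simb = i
--     else:
--         return word
--     return result
-- ===== SOURCE B (Python) =====
-- def double(word):
--     if len(word) <= 1:
--         return word
--     out = []
--     i = 0
--     n = len(word)
--     while i < n:
--         j = i
--         while j < n and word[j] == word[i]:
--             j += 1
--         out.append(word[i] * (j - i - 1))
--         i = j
--     return ''.join(out)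
-- ===== Notes on version B (the rewrite author's own statement) =====
-- stated objective: alternative
-- what changed: B scans maximal runs of equal characters with two indices and emits each run character (run length - 1) times into a list joined once, instead of A's per-character loop tracking the previous character and growing a string; the len<=1 early return is kept.
import Mathlib
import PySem

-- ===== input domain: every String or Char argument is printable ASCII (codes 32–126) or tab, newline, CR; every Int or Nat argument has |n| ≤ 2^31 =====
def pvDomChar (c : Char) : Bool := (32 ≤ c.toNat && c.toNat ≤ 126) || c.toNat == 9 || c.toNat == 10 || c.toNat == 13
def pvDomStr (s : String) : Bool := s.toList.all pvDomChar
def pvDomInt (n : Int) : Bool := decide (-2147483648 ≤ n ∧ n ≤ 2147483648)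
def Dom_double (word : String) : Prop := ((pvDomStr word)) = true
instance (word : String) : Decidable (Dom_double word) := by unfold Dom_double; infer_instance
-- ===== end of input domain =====

-- B collects maximal runs of equal characters with two indices instead of A's previous-character tracking; same values, alternative structure.

-- ===== PORT A =====
-- A: loop over the characters keeping the previous character (a string, '' initially);
-- append the character when it equals the previous one.  Strings are carried as List Char.
def double (word : String) : String :=
  if word.length > 1 then
    String.ofList ((word.toList.foldl
      (fun (st : List Char × List Char) i =>
        if st.2 == [i] then (st.1 ++ [i], [i]) else (st.1, [i]))
      ([], [])).1)
  else word

-- ===== PORT B =====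
-- inner while of Source B: advance j while j < n and word[j] == c
def runEndB (cs : List Char) (n : Nat) (c : Char) (j : Nat) : Nat :=
  if h : j < n ∧ cs.getD j default == c then runEndB cs n c (j + 1) else j
termination_by n - j
decreasing_by omega

theorem runEndB_ge (cs : List Char) (n : Nat) (c : Char) (j : Nat) :
    j ≤ runEndB cs n c j := by
  rw [runEndB]
  split
  next h => have ih := runEndB_ge cs n c (j + 1); omega
  next => exact Nat.le_refl _
termination_by n - j
decreasing_by omega

theorem runEndB_gt (cs : List Char) (n : Nat) (j : Nat) (h : j < n) :
    j < runEndB cs n (cs.getD j default) j := by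
  rw [runEndB]
  split
  next => have := runEndB_ge cs n (cs.getD j default) (j + 1); omega
  next hc => exact absurd ⟨h, by simp⟩ hc

-- outer while of Source B: per run at i, emit word[i] repeated (j - i - 1) times
def altLoopB (cs : List Char) (n : Nat) (i : Nat) (out : List Char) : List Char :=
  if _h : i < n then
    let c := cs.getD i default
    let j := runEndB cs n c i
    altLoopB cs n j (out ++ List.replicate (j - i - 1) c)
  else out
termination_by n - i
decreasing_by have := runEndB_gt cs n i _h; omega

def double_alt (word : String) : String :=
  if word.length ≤ 1 then word
  else String.ofList (altLoopB word.toList word.toList.length 0 [])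

-- ===== PRECONDITION & SPEC =====
def Spec_double (word : String) (out : String) : Prop := out = double_alt word
instance (word : String) (out : String) : Decidable (Spec_double word out) := by unfold Spec_double; infer_instance

-- ===== CLAIM (what is proved, stated in full; the proofs are below) =====
def Claim_equal_double : Prop := ∀ (word : String), Dom_double word → Spec_double word (double word)

-- ===== LEMMAS AND PROOFS =====

-- the common value: characters equal to their predecessor, with predecessor-state s
def dupS : List Char → List Char → List Char
  | _, [] => []
  | s, c :: cs => (if s == [c] then [c] else []) ++ dupS [c] cs

def dupHead : List Char → List Char
  | [] => []
  | c :: cs => dupS [c] cs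

theorem foldA (cs : List Char) : ∀ (r s : List Char),
    (cs.foldl (fun (st : List Char × List Char) i =>
        if st.2 == [i] then (st.1 ++ [i], [i]) else (st.1, [i])) (r, s)).1
      = r ++ dupS s cs := by
  induction cs with
  | nil => intro r s; simp [dupS]
  | cons c cs ih =>
    intro r s
    rw [List.foldl_cons]
    by_cases h : (s == [c]) = true
    · rw [if_pos h, ih]
      simp [dupS, h, List.append_assoc]
    · rw [if_neg h, ih]
      simp [dupS, h]

theorem runEndB_le (cs : List Char) (n : Nat) (c : Char) (j : Nat) (h : j ≤ n) :
    runEndB cs n c j ≤ n := by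
  rw [runEndB]
  split
  next hc => exact runEndB_le cs n c (j + 1) hc.1
  next => exact h
termination_by n - j
decreasing_by omega

theorem runEndB_spec (cs : List Char) (c : Char) (j : Nat) (h : j ≤ cs.length) :
    runEndB cs cs.length c j = j + ((cs.drop j).takeWhile (· == c)).length := by
  rw [runEndB]
  by_cases hj : j < cs.length
  · have hd : cs.drop j = cs[j] :: cs.drop (j + 1) := List.drop_eq_getElem_cons hj
    have hg : cs.getD j default = cs[j] := List.getD_eq_getElem cs default hj
    by_cases hc : (cs[j] == c) = true
    · rw [dif_pos ⟨hj, by rw [hg]; exact hc⟩, runEndB_spec cs c (j + 1) hj, hd,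
        List.takeWhile_cons_of_pos (by simpa using hc)]
      simp
      omega
    · rw [dif_neg (by rw [hg]; simp [hc]), hd,
        List.takeWhile_cons_of_neg (by simpa using hc)]
      simp
  · have : j = cs.length := by omega
    subst this
    rw [dif_neg (by omega)]
    simp
termination_by cs.length - j
decreasing_by omega

-- drop past the takeWhile prefix is the dropWhile suffix
theorem drop_takeWhile (p : Char → Bool) (l : List Char) :
    l.drop (l.takeWhile p).length = l.dropWhile p := by
  induction l with
  | nil => simp
  | cons d r ih =>
    by_cases h : p d
    · simp [h, ih]
    · simp [h]

theorem dupS_run (rest : List Char) : ∀ (c : Char),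
    dupS [c] rest
      = List.replicate ((rest.takeWhile (· == c)).length) c
        ++ dupHead (rest.dropWhile (· == c)) := by
  induction rest with
  | nil => intro c; simp [dupS, dupHead]
  | cons d r ih =>
    intro c
    by_cases h : (d == c) = true
    · have hdc : d = c := by exact beq_iff_eq.mp h
      subst hdc
      simp [dupS, List.replicate_succ, ih d]
    · have hne : ([c] == [d]) = false := by
        have : ¬ c = d := fun e => by subst e; simp at h
        simp [this]
      simp [dupS, dupHead, h, hne]

theorem altLoopB_spec (cs : List Char) (i : Nat) (out : List Char) (h : i ≤ cs.length) :
    altLoopB cs cs.length i out = out ++ dupHead (cs.drop i) := by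
  rw [altLoopB]
  by_cases hi : i < cs.length
  · rw [dif_pos hi]
    have hg : cs.getD i default = cs[i] := List.getD_eq_getElem cs default hi
    have hd : cs.drop i = cs[i] :: cs.drop (i + 1) := List.drop_eq_getElem_cons hi
    have hj : runEndB cs cs.length (cs.getD i default) i
        = i + 1 + (((cs.drop (i + 1)).takeWhile (· == cs[i])).length) := by
      rw [runEndB_spec cs _ i (by omega), hd, hg,
        List.takeWhile_cons_of_pos (by simp)]
      simp
      omega
    have hjle : runEndB cs cs.length (cs.getD i default) i ≤ cs.length :=
      runEndB_le cs cs.length _ i (by omega)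
    rw [altLoopB_spec cs _ _ hjle, hj, hg]
    have hdropj : cs.drop (i + 1 + (((cs.drop (i + 1)).takeWhile (· == cs[i])).length))
        = (cs.drop (i + 1)).dropWhile (· == cs[i]) := by
      rw [← drop_takeWhile (· == cs[i]) (cs.drop (i + 1)), List.drop_drop]
    rw [hdropj, hd]
    have : i + 1 + (((cs.drop (i + 1)).takeWhile (· == cs[i])).length) - i - 1
        = ((cs.drop (i + 1)).takeWhile (· == cs[i])).length := by omega
    rw [this]
    show out ++ List.replicate _ cs[i] ++ dupHead _ = out ++ dupHead (cs[i] :: cs.drop (i + 1))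
    rw [List.append_assoc]
    congr 1
    exact (dupS_run (cs.drop (i + 1)) cs[i]).symm
  · rw [dif_neg hi]
    have : i = cs.length := by omega
    subst this
    simp [dupHead]
termination_by cs.length - i
decreasing_by have := runEndB_gt cs cs.length i hi; omega

theorem dupS_nil_cons (c : Char) (cs : List Char) :
    dupS [] (c :: cs) = dupS [c] cs := by
  simp [dupS]

-- ===== VERDICT (by name: the statement is the Claim_ definition above) =====
theorem double_spec : Claim_equal_double := by
  intro word _
  unfold Spec_double double double_alt
  by_cases h : word.length > 1
  · rw [if_pos h, if_neg (by omega)]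
    have hlen : word.toList.length = word.length := by simp
    obtain ⟨c, rest, hcr⟩ : ∃ c rest, word.toList = c :: rest := by
      cases hw : word.toList with
      | nil => exfalso; rw [hw] at hlen; simp at hlen; omega
      | cons c rest => exact ⟨c, rest, rfl⟩
    rw [altLoopB_spec word.toList 0 [] (by omega)]
    rw [foldA]
    simp [hcr, dupS_nil_cons, dupHead]
  · rw [if_neg h, if_pos (by omega)]
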